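-- pv_equiv track=rewrite | github.com/ryota-sugimoto/palmsite | scripts/unused/label_from_rdrpcatch_pfam_palmannot.py | summarize_model_overlap
-- ===== SOURCE A (Python) =====
-- from typing import Dict, Iterable, Iterator, List, Optional, Sequence, Tuple
--
-- def merge_intervals(iv: Sequence[Tuple[int, int]], max_gap: int = 0) -> List[Tuple[int, int]]:
--     if not iv:
--         return []
--     arr = sorted(iv, key=lambda x: (x[0], x[1]))
--     out: List[Tuple[int, int]] = [arr[0]]
--     for s, e in arr[1:]:
--         ps, pe = out[-1]
--         if s <= pe + max_gap:
--             out[-1] = (ps, max(pe, e))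
--         else:
--             out.append((s, e))
--     return out
--
-- def intersect_len(iv1: Sequence[Tuple[int, int]], iv2: Sequence[Tuple[int, int]]) -> int:
--     a = merge_intervals(iv1, max_gap=0)
--     b = merge_intervals(iv2, max_gap=0)
--     i = j = 0
--     total = 0
--     while i < len(a) and j < len(b):
--         s = max(a[i][0], b[j][0])
--         e = min(a[i][1], b[j][1])
--         if e > s:
--             total += e - s
--         if a[i][1] < b[j][1]:
--             i += 1
--         else:
--             j += 1
--     return total
--
-- def summarize_model_overlap(
--     span_iv: Sequence[Tuple[int, int]],
--     model_to_intervals: Dict[str, List[Tuple[int, int]]],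
--     topn: int = 8,
-- ) -> str:
--     if not span_iv or not model_to_intervals:
--         return ""
--     pairs = []
--     for model, iv in model_to_intervals.items():
--         ov = intersect_len(span_iv, iv)
--         if ov > 0:
--             pairs.append((model, ov))
--     pairs.sort(key=lambda x: (-x[1], x[0]))
--     shown = pairs[:topn]
--     return ",".join(f"{m}:{ov}" for m, ov in shown)
-- ===== SOURCE B (Python) =====
-- def merge_intervals(iv, max_gap=0):
--     if not iv:
--         return []
--     arr = sorted(iv, key=lambda x: (x[0], x[1]))
--     out = [arr[0]]
--     for s, e in arr[1:]:
--         ps, pe = out[-1]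
--         if s <= pe + max_gap:
--             out[-1] = (ps, max(pe, e))
--         else:
--             out.append((s, e))
--     return out
--
-- def overlap_len(a, b):
--     # a and b are merged (disjoint, start-ordered) interval lists: the total
--     # intersection is the sum of the positive parts of all pairwise overlaps.
--     return sum(max(0, min(e1, e2) - max(s1, s2)) for s1, e1 in a for s2, e2 in b)
--
-- def summarize_model_overlap(span_iv, model_to_intervals, topn=8):
--     if not span_iv or not model_to_intervals:
--         return ""
--     span = merge_intervals(span_iv)
--     pairs = [(m, ov)
--              for m, iv in model_to_intervals.items()
--              for ov in (overlap_len(span, merge_intervals(iv)),)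
--              if ov > 0]
--     shown = sorted(pairs, key=lambda x: (-x[1], x[0]))[:topn]
--     return ",".join("%s:%d" % p for p in shown)
-- ===== Notes on version B (the rewrite author's own statement) =====
-- stated objective: faster
-- what changed: The two-pointer sweep in intersect_len is replaced by a direct sum of the clipped pairwise overlaps between the merged span and each model's merged intervals, the span is sorted/merged once instead of once per model, and the loop-and-append plus in-place sort top level becomes a comprehension with sorted().
import Mathlib
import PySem

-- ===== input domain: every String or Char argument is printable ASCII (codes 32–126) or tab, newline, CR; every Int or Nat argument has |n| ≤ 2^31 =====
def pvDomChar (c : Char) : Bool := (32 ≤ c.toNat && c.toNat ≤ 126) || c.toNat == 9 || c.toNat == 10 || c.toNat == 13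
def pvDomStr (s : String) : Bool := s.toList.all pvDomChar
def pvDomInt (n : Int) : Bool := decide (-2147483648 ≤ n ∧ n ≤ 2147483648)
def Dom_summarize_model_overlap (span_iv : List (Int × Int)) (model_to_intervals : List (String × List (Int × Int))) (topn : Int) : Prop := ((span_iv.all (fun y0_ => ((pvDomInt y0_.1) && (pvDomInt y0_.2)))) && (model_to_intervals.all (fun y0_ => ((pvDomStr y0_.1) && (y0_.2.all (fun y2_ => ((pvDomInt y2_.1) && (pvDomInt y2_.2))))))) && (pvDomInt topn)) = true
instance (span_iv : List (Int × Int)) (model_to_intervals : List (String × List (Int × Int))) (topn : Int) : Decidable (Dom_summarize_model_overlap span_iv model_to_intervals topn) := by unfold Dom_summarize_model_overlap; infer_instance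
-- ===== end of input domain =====

-- B replaces A's two-pointer sweep over the merged interval lists by a direct sum of
-- the clipped pairwise overlaps (merging the span once); same result on all inputs.

-- ===== PORT A =====
-- merge_intervals(iv, max_gap): sort by (start, end), then a fold that mutates the
-- last interval of `out` or appends; `out` is modelled as (init, last), out = init ++ [last]
def merge_intervals (iv : List (Int × Int)) (max_gap : Int) : List (Int × Int) :=
  if iv = [] then []
  else
    match PySem.List.sorted2 iv (fun x => x.1) (fun x => x.2) with
    | [] => []  -- unreachable: the sorted list of a nonempty list is nonempty
    | a0 :: rest =>
      let st := rest.foldl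
        (fun (st : List (Int × Int) × (Int × Int)) x =>
          if x.1 ≤ st.2.2 + max_gap then (st.1, (st.2.1, max st.2.2 x.2))
          else (st.1 ++ [st.2], x)) ([], a0)
      st.1 ++ [st.2]

-- the while-loop of intersect_len: the two indices become structural recursion on the lists
def twoPtr : List (Int × Int) → List (Int × Int) → Int
  | [], _ => 0
  | _ :: _, [] => 0
  | (sa, ea) :: as_, (sb, eb) :: bs =>
    let s := max sa sb
    let e := min ea eb
    (if e > s then e - s else 0) +
      (if ea < eb then twoPtr as_ ((sb, eb) :: bs) else twoPtr ((sa, ea) :: as_) bs)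
  termination_by a b => a.length + b.length

def intersect_len (iv1 iv2 : List (Int × Int)) : Int :=
  twoPtr (merge_intervals iv1 0) (merge_intervals iv2 0)

def summarize_model_overlap (span_iv : List (Int × Int)) (model_to_intervals : List (String × List (Int × Int))) (topn : Int) : String :=
  -- `not model_to_intervals` tests the dict: the dict built from the pairs is empty iff the pair list is
  if span_iv = [] ∨ model_to_intervals = [] then ""
  else
    let items := (PySem.Dict.ofList model_to_intervals).items
    let pairs := items.foldl
      (fun (acc : List (String × Int)) mi =>
        let ov := intersect_len span_iv mi.2
        if ov > 0 then acc ++ [(mi.1, ov)] else acc) []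
    let shown := PySem.List.slice (PySem.List.sorted2 pairs (fun x => -x.2) (fun x => x.1)) none (some topn)
    PySem.Str.join "," (shown.map (fun p => p.1 ++ ":" ++ PySem.Int.toStr p.2))

-- ===== PORT B =====
-- sum(max(0, min(e1, e2) - max(s1, s2)) for s1, e1 in a for s2, e2 in b)
def overlap_len (a b : List (Int × Int)) : Int :=
  (a.flatMap (fun p => b.map (fun q => max 0 (min p.2 q.2 - max p.1 q.1)))).sum

def summarize_model_overlap_alt (span_iv : List (Int × Int)) (model_to_intervals : List (String × List (Int × Int))) (topn : Int) : String :=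
  if span_iv = [] ∨ model_to_intervals = [] then ""
  else
    let span := merge_intervals span_iv 0
    let pairs := (PySem.Dict.ofList model_to_intervals).items.flatMap
      (fun mi =>
        let ov := overlap_len span (merge_intervals mi.2 0)
        if ov > 0 then [(mi.1, ov)] else [])
    let shown := PySem.List.slice (PySem.List.sorted2 pairs (fun x => -x.2) (fun x => x.1)) none (some topn)
    PySem.Str.join "," (shown.map (fun p => p.1 ++ ":" ++ PySem.Int.toStr p.2))

-- ===== PRECONDITION & SPEC =====
def Spec_summarize_model_overlap (span_iv : List (Int × Int)) (model_to_intervals : List (String × List (Int × Int))) (topn : Int) (out : String) : Prop := out = summarize_model_overlap_alt span_iv model_to_intervals topn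
instance (span_iv : List (Int × Int)) (model_to_intervals : List (String × List (Int × Int))) (topn : Int) (out : String) : Decidable (Spec_summarize_model_overlap span_iv model_to_intervals topn out) := by unfold Spec_summarize_model_overlap; infer_instance

-- ===== CLAIM (what is proved, stated in full; the proofs are below) =====
def Claim_equal_summarize_model_overlap : Prop := ∀ (span_iv : List (Int × Int)) (model_to_intervals : List (String × List (Int × Int))) (topn : Int), Dom_summarize_model_overlap span_iv model_to_intervals topn → Spec_summarize_model_overlap span_iv model_to_intervals topn (summarize_model_overlap span_iv model_to_intervals topn)

-- ===== LEMMAS AND PROOFS =====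

-- inserting into a list sorted by (start, end) keeps the starts nondecreasing
theorem insertBy_fst_pairwise (x : Int × Int) (ys : List (Int × Int))
    (h : ys.Pairwise (fun p q => p.1 ≤ q.1)) :
    (PySem.List.insertBy
      (fun a b : Int × Int => decide (a.1 < b.1) || (!decide (b.1 < a.1) && decide (a.2 < b.2)))
      x ys).Pairwise (fun p q => p.1 ≤ q.1) := by
  induction ys with
  | nil => simp [PySem.List.insertBy]
  | cons y ys ih =>
    rw [List.pairwise_cons] at h
    obtain ⟨hy, hys⟩ := h
    by_cases hb : (decide (x.1 < y.1) || (!decide (y.1 < x.1) && decide (x.2 < y.2))) = true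
    · rw [show PySem.List.insertBy _ x (y :: ys) = x :: y :: ys by
        simp [PySem.List.insertBy, hb]]
      have hxy : x.1 ≤ y.1 := by
        simp only [Bool.or_eq_true, Bool.and_eq_true, Bool.not_eq_true', decide_eq_true_eq,
          decide_eq_false_iff_not] at hb
        rcases hb with h1 | ⟨h1, _⟩ <;> omega
      refine List.Pairwise.cons ?_ (List.Pairwise.cons hy hys)
      intro z hz
      rcases hz with _ | hz
      · exact hxy
      · exact le_trans hxy (hy _ (by assumption))
    · rw [show PySem.List.insertBy _ x (y :: ys) = y :: PySem.List.insertBy _ x ys by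
        simp only [PySem.List.insertBy]; rw [if_neg hb]]
      refine List.Pairwise.cons ?_ (ih hys)
      intro z hz
      rw [PySem.List.mem_insertBy] at hz
      rcases hz with rfl | hz
      · simp only [Bool.or_eq_true, Bool.and_eq_true, Bool.not_eq_true', decide_eq_true_eq,
          decide_eq_false_iff_not] at hb
        omega
      · exact hy _ hz

theorem sorted2_fst_pairwise (iv : List (Int × Int)) :
    (PySem.List.sorted2 iv (fun x => x.1) (fun x => x.2)).Pairwise (fun p q => p.1 ≤ q.1) := by
  show (List.foldl (fun acc x => PySem.List.insertBy
      (fun a b : Int × Int => decide (a.1 < b.1) || (!decide (b.1 < a.1) && decide (a.2 < b.2)))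
      x acc) [] iv).Pairwise (fun p q => p.1 ≤ q.1)
  have main : ∀ (l acc : List (Int × Int)), acc.Pairwise (fun p q : Int × Int => p.1 ≤ q.1) →
      (List.foldl (fun acc x => PySem.List.insertBy
        (fun a b : Int × Int => decide (a.1 < b.1) || (!decide (b.1 < a.1) && decide (a.2 < b.2)))
        x acc) acc l).Pairwise (fun p q => p.1 ≤ q.1) := by
    intro l
    induction l with
    | nil => intro acc h; simpa using h
    | cons x xs ih => intro acc h; exact ih _ (insertBy_fst_pairwise x acc h)
  exact main iv [] (by simp)

theorem pairwise_append_singleton {α : Type} {R : α → α → Prop} (l : List α) (a : α) :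
    (l ++ [a]).Pairwise R ↔ l.Pairwise R ∧ ∀ x ∈ l, R x a := by
  simp [List.pairwise_append]

-- the merge loop keeps the produced intervals strictly separated (prev end < next start)
theorem mergeLoop_pairwise (rest : List (Int × Int)) :
    ∀ (init : List (Int × Int)) (last : Int × Int),
      (init ++ [last]).Pairwise (fun p q : Int × Int => p.2 < q.1) →
      (∀ x ∈ rest, last.1 ≤ x.1) →
      rest.Pairwise (fun p q => p.1 ≤ q.1) →
      ((rest.foldl
        (fun (st : List (Int × Int) × (Int × Int)) x =>
          if x.1 ≤ st.2.2 + 0 then (st.1, (st.2.1, max st.2.2 x.2))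
          else (st.1 ++ [st.2], x)) (init, last)).1 ++
        [(rest.foldl
          (fun (st : List (Int × Int) × (Int × Int)) x =>
            if x.1 ≤ st.2.2 + 0 then (st.1, (st.2.1, max st.2.2 x.2))
            else (st.1 ++ [st.2], x)) (init, last)).2]).Pairwise (fun p q : Int × Int => p.2 < q.1) := by
  induction rest with
  | nil => intro init last h1 _ _; simpa using h1
  | cons x rs ih =>
    intro init last h1 h2 h3
    rw [List.pairwise_cons] at h3
    obtain ⟨h3a, h3b⟩ := h3
    rw [pairwise_append_singleton] at h1
    simp only [List.foldl_cons]
    by_cases hc : x.1 ≤ last.2 + 0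
    · rw [if_pos hc]
      refine ih init (last.1, max last.2 x.2) ?_ ?_ h3b
      · rw [pairwise_append_singleton]
        exact ⟨h1.1, fun y hy => h1.2 y hy⟩
      · intro y hy; exact h2 y (by simp [hy])
    · rw [if_neg hc]
      refine ih (init ++ [last]) x ?_ ?_ h3b
      · rw [pairwise_append_singleton, pairwise_append_singleton]
        refine ⟨⟨h1.1, h1.2⟩, ?_⟩
        intro y hy
        rcases List.mem_append.1 hy with hy | hy
        · have := h1.2 y hy
          have hx1 : last.1 ≤ x.1 := h2 x (by simp)
          omega
        · simp at hy
          subst hy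
          omega
      · intro y hy; exact h3a y hy

theorem merge_pairwise (iv : List (Int × Int)) :
    (merge_intervals iv 0).Pairwise (fun p q : Int × Int => p.2 < q.1) := by
  unfold merge_intervals
  by_cases h : iv = []
  · simp [h]
  · rw [if_neg h]
    have hs := sorted2_fst_pairwise iv
    cases hsrt : PySem.List.sorted2 iv (fun x => x.1) (fun x => x.2) with
    | nil => simp
    | cons a0 rest =>
      rw [hsrt, List.pairwise_cons] at hs
      exact mergeLoop_pairwise rest [] a0 (by simp) (fun x hx => hs.1 x hx) hs.2

theorem overlap_len_nil_right (a : List (Int × Int)) : overlap_len a [] = 0 := by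
  simp only [overlap_len, List.map_nil]
  rw [List.flatMap_eq_nil_iff.mpr fun x _ => rfl]
  rfl

theorem overlap_len_cons_left (p : Int × Int) (as_ b : List (Int × Int)) :
    overlap_len (p :: as_) b
      = (b.map (fun q => max 0 (min p.2 q.2 - max p.1 q.1))).sum + overlap_len as_ b := by
  simp [overlap_len]

theorem overlap_len_cons_right (a : List (Int × Int)) (q : Int × Int) (bs : List (Int × Int)) :
    overlap_len a (q :: bs) = (a.map (fun p => max 0 (min p.2 q.2 - max p.1 q.1))).sum + overlap_len a bs := by
  induction a with
  | nil => simp [overlap_len]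
  | cons p as_ ih =>
    rw [overlap_len_cons_left, overlap_len_cons_left, ih]
    simp only [List.map_cons, List.sum_cons]
    ring

-- the sweep equals the pairwise sum: on merged lists every pair the sweep skips overlaps by ≤ 0
theorem twoPtr_eq_aux (n : Nat) : ∀ (a b : List (Int × Int)), a.length + b.length ≤ n →
    a.Pairwise (fun p q : Int × Int => p.2 < q.1) →
    b.Pairwise (fun p q : Int × Int => p.2 < q.1) →
    twoPtr a b = overlap_len a b := by
  induction n with
  | zero =>
    intro a b hlen _ _
    match a, b with
    | [], b => simp [twoPtr, overlap_len]
    | p :: as_, b => simp at hlen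
  | succ n ih =>
    intro a b hlen ha hb
    match a, b with
    | [], b => simp [twoPtr, overlap_len]
    | p :: as_, [] => rw [overlap_len_nil_right]; simp [twoPtr]
    | (sa, ea) :: as_, (sb, eb) :: bs =>
      rw [List.pairwise_cons] at ha hb
      rw [twoPtr]
      by_cases hlt : ea < eb
      · rw [if_pos hlt, ih as_ ((sb, eb) :: bs) (by simp at hlen ⊢; omega) ha.2
          (List.pairwise_cons.2 hb)]
        rw [overlap_len_cons_left]
        have hz : (bs.map (fun q => max 0 (min ea q.2 - max sa q.1))).sum = 0 := by
          apply List.sum_eq_zero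
          intro x hx
          simp only [List.mem_map] at hx
          obtain ⟨q, hq, rfl⟩ := hx
          have := hb.1 q hq
          omega
        simp only [List.map_cons, List.sum_cons] at *
        omega
      · rw [if_neg hlt, ih ((sa, ea) :: as_) bs (by simp at hlen ⊢; omega)
          (List.pairwise_cons.2 ha) hb.2]
        rw [overlap_len_cons_right]
        have hz : (as_.map (fun p => max 0 (min p.2 eb - max p.1 sb))).sum = 0 := by
          apply List.sum_eq_zero
          intro x hx
          simp only [List.mem_map] at hx
          obtain ⟨p, hp, rfl⟩ := hx
          have := ha.1 p hp
          omega
        simp only [List.map_cons, List.sum_cons] at *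
        omega

theorem twoPtr_eq_overlap_len (a b : List (Int × Int))
    (ha : a.Pairwise (fun p q : Int × Int => p.2 < q.1))
    (hb : b.Pairwise (fun p q : Int × Int => p.2 < q.1)) :
    twoPtr a b = overlap_len a b :=
  twoPtr_eq_aux (a.length + b.length) a b le_rfl ha hb

theorem intersect_len_eq (sp iv : List (Int × Int)) :
    intersect_len sp iv = overlap_len (merge_intervals sp 0) (merge_intervals iv 0) :=
  twoPtr_eq_overlap_len _ _ (merge_pairwise sp) (merge_pairwise iv)

theorem foldl_append_ite_eq_flatMap {α β : Type} (l : List α) (F : α → Int) (f : α → β) (acc : List β) :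
    l.foldl (fun acc x => if F x > 0 then acc ++ [f x] else acc) acc
      = acc ++ l.flatMap (fun x => if F x > 0 then [f x] else []) := by
  induction l generalizing acc with
  | nil => simp
  | cons x xs ih =>
    simp only [List.foldl_cons, List.flatMap_cons]
    by_cases h : F x > 0
    · rw [if_pos h, if_pos h, ih]; simp
    · rw [if_neg h, if_neg h, ih]; simp

theorem main_eq (span_iv : List (Int × Int)) (model_to_intervals : List (String × List (Int × Int))) (topn : Int) :
    summarize_model_overlap span_iv model_to_intervals topn
      = summarize_model_overlap_alt span_iv model_to_intervals topn := by
  unfold summarize_model_overlap summarize_model_overlap_alt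
  by_cases h : span_iv = [] ∨ model_to_intervals = []
  · rw [if_pos h, if_pos h]
  · rw [if_neg h, if_neg h]
    have hp : ((PySem.Dict.ofList model_to_intervals).items.foldl
        (fun (acc : List (String × Int)) mi =>
          let ov := intersect_len span_iv mi.2
          if ov > 0 then acc ++ [(mi.1, ov)] else acc) [])
        = (PySem.Dict.ofList model_to_intervals).items.flatMap
          (fun mi =>
            let ov := overlap_len (merge_intervals span_iv 0) (merge_intervals mi.2 0)
            if ov > 0 then [(mi.1, ov)] else []) := by
      show ((PySem.Dict.ofList model_to_intervals).items.foldl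
        (fun (acc : List (String × Int)) mi =>
          if intersect_len span_iv mi.2 > 0 then acc ++ [(mi.1, intersect_len span_iv mi.2)] else acc) [])
        = (PySem.Dict.ofList model_to_intervals).items.flatMap
          (fun mi =>
            if overlap_len (merge_intervals span_iv 0) (merge_intervals mi.2 0) > 0
            then [(mi.1, overlap_len (merge_intervals span_iv 0) (merge_intervals mi.2 0))] else [])
      rw [foldl_append_ite_eq_flatMap _ (fun mi : String × List (Int × Int) => intersect_len span_iv mi.2)
          (fun mi : String × List (Int × Int) => (mi.1, intersect_len span_iv mi.2)) []]
      simp only [List.nil_append]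
      apply List.flatMap_congr
      intro mi _
      rw [intersect_len_eq]
    simp only [hp]

-- ===== VERDICT (by name: the statement is the Claim_ definition above) =====
theorem summarize_model_overlap_spec : Claim_equal_summarize_model_overlap := by
  intro span_iv model_to_intervals topn _
  exact main_eq span_iv model_to_intervals topn
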